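-- pv_equiv track=rewrite | github.com/colinroybell/aoc-py | src/ec2024/day06.py | recurse
-- ===== SOURCE A (Python) =====
-- def recurse(part, nodes, node, count, string):
--     fruits = {}
--     if node == "@":
--         fruits[count] = string
--     elif node == "ANT" or node == "BUG":
--         pass
--     elif node in nodes:
--         for s in nodes[node]:
--             if part == 1:
--                 new_string = string + s
--             else:
--                 new_string = string + s[0]
--             s_fruits = recurse(part, nodes, s, count + 1, new_string)
--             for s_count, s_string in s_fruits.items():
--                 if s_count not in fruits:
--                     fruits[s_count] = s_string
--                 else:
--                     fruits[s_count] = "DUP"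
--     return fruits
-- ===== SOURCE B (Python) =====
-- def recurse(part, nodes, node, count, string):
--     # Compute each node's fruits once (memo), relative to count 0 / empty
--     # string (None marks DUP), then shift by count and prefix with string.
--     memo = {}
--
--     def rel(n):
--         if n in memo:
--             return memo[n]
--         fruits = {}
--         if n == "@":
--             fruits[0] = ""
--         elif n == "ANT" or n == "BUG":
--             pass
--         elif n in nodes:
--             for s in nodes[n]:
--                 pre = s if part == 1 else s[0]
--                 for c, v in rel(s).items():
--                     if c + 1 not in fruits:
--                         fruits[c + 1] = None if v is None else pre + v
--                     else:
--                         fruits[c + 1] = None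
--         memo[n] = fruits
--         return fruits
--
--     r = rel(node)
--     return {c + count: ("DUP" if v is None else string + v) for c, v in r.items()}
-- ===== Notes on version B (the rewrite author's own statement) =====
-- stated objective: alternative
-- what changed: B computes for each node a single memoized 'relative' fruits dict (depth offsets from 0, DUP tagged as None) and applies the count offset and string prefix once at the end, instead of A's top-down recursion that re-explores every root-to-@ path carrying the absolute count and prefix string; on the generated random inputs a timing run measured no speed difference.
import Mathlib
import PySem

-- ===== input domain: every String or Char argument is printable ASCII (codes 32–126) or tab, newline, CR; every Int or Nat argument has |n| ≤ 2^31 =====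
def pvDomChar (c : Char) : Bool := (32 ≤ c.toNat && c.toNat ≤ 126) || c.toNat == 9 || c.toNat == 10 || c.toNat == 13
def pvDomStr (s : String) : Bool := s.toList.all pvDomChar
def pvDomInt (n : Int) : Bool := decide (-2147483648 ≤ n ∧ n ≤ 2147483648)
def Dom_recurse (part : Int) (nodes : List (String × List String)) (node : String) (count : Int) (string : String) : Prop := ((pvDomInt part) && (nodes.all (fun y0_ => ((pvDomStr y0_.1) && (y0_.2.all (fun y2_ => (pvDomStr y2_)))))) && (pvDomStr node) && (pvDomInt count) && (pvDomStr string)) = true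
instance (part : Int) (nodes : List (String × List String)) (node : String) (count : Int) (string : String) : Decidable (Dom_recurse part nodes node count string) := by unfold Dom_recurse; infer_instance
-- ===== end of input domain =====

-- B memoizes one relative fruits dict per node (DUP tagged as `none`) and applies the
-- count offset / string prefix once at the end, instead of A's per-path recursion that
-- carries the absolute count and prefix string into every call.

-- ===== PORT A =====
-- Fueled transliteration of A's recursion: `none` marks the calls on which the Python
-- does not return (infinite recursion on a cycle, or IndexError on s[0] with s = "");
-- Pre_recurse excludes exactly those inputs, and fuel nodes.length+1 suffices on the rest.
mutual
def recurseF (part : Int) (nodesD : PySem.Dict String (List String)) :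
    Nat → String → Int → String → Option (PySem.Dict Int String)
  | 0, _, _, _ => none
  | f + 1, node, count, string =>
    if node == "@" then
      some (PySem.Dict.insert PySem.Dict.empty count string)
    else if node == "ANT" || node == "BUG" then
      some PySem.Dict.empty
    else
      match PySem.Dict.get? nodesD node with
      | some children => loopA part nodesD f children count string PySem.Dict.empty
      | none => some PySem.Dict.empty

def loopA (part : Int) (nodesD : PySem.Dict String (List String)) :
    Nat → List String → Int → String → PySem.Dict Int String → Option (PySem.Dict Int String)
  | _, [], _, _, fruits => some fruits
  | f, s :: rest, count, string, fruits =>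
    match (if part == 1 then some (string ++ s)
           else (PySem.Str.pyGet? s 0).map (fun ch => string ++ String.singleton ch)) with
    | none => none
    | some newString =>
      match recurseF part nodesD f s (count + 1) newString with
      | none => none
      | some sFruits =>
        loopA part nodesD f rest count string
          (sFruits.items.foldl
            (fun fr kv =>
              if fr.contains kv.1 = false then fr.insert kv.1 kv.2 else fr.insert kv.1 "DUP")
            fruits)
end

def recurse (part : Int) (nodes : List (String × List String)) (node : String) (count : Int) (string : String) : List (Int × String) :=
  match recurseF part (PySem.Dict.mk nodes) (nodes.length + 1) node count string with
  | some fruits => fruits.items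
  | none => []

-- ===== PORT B =====
-- Transliteration of Source B: `rel` with a memo dict threaded through; values are relative
-- (key offset 0, no prefix), `none` tags DUP; same fuel convention as the A port.
mutual
def relF (part : Int) (nodesD : PySem.Dict String (List String)) :
    Nat → PySem.Dict String (PySem.Dict Int (Option String)) → String →
    Option (PySem.Dict String (PySem.Dict Int (Option String)) × PySem.Dict Int (Option String))
  | 0, _, _ => none
  | f + 1, memo, n =>
    match PySem.Dict.get? memo n with
    | some r => some (memo, r)
    | none =>
      match
        (if n == "@" then
          some (memo, PySem.Dict.insert PySem.Dict.empty 0 (some ""))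
        else if n == "ANT" || n == "BUG" then
          some (memo, PySem.Dict.empty)
        else
          match PySem.Dict.get? nodesD n with
          | some children => loopB part nodesD f memo children PySem.Dict.empty
          | none => some (memo, PySem.Dict.empty)) with
      | none => none
      | some (memo1, fruits) => some (memo1.insert n fruits, fruits)

def loopB (part : Int) (nodesD : PySem.Dict String (List String)) :
    Nat → PySem.Dict String (PySem.Dict Int (Option String)) → List String →
    PySem.Dict Int (Option String) →
    Option (PySem.Dict String (PySem.Dict Int (Option String)) × PySem.Dict Int (Option String))
  | _, memo, [], fruits => some (memo, fruits)
  | f, memo, s :: rest, fruits =>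
    match (if part == 1 then some s
           else (PySem.Str.pyGet? s 0).map (fun ch => String.singleton ch)) with
    | none => none
    | some pre =>
      match relF part nodesD f memo s with
      | none => none
      | some (memo1, r) =>
        loopB part nodesD f memo1 rest
          (r.items.foldl
            (fun fr kv =>
              if fr.contains (kv.1 + 1) = false then
                fr.insert (kv.1 + 1) (Option.map (fun v => pre ++ v) kv.2)
              else fr.insert (kv.1 + 1) none)
            fruits)
end

def recurse_alt (part : Int) (nodes : List (String × List String)) (node : String) (count : Int) (string : String) : List (Int × String) :=
  match relF part (PySem.Dict.mk nodes) (nodes.length + 1) PySem.Dict.empty node with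
  | some (_, r) =>
    r.items.map (fun kv => (kv.1 + count, match kv.2 with | none => "DUP" | some v => string ++ v))
  | none => []

-- ===== PRECONDITION & SPEC =====
-- Kahn-style elimination: okChildPre says a child call returns without recursing into an
-- unfinished key; stepPre keeps the keys all of whose children are fine (and, for part ≠ 1,
-- nonempty, else s[0] raises IndexError).
def okChildPre (nodesD : PySem.Dict String (List String)) (T : List String) (s : String) : Bool :=
  s == "@" || s == "ANT" || s == "BUG" || !(nodesD.contains s) || T.contains s

def stepPre (part : Int) (nodesD : PySem.Dict String (List String)) (keys : List String) (T : List String) : List String :=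
  keys.filter (fun k =>
    match PySem.Dict.get? nodesD k with
    | some children => children.all (fun s => (part == 1 || !(s == "")) && okChildPre nodesD T s)
    | none => false)

-- Pre_ excludes exactly the inputs on which the Python A does not return a value: a cycle
-- among the keys reachable from node (infinite recursion) or, for part ≠ 1, a reachable
-- empty child label (IndexError on s[0]).
def Pre_recurse (part : Int) (nodes : List (String × List String)) (node : String) (count : Int) (string : String) : Prop :=
  okChildPre (PySem.Dict.mk nodes)
    ((stepPre part (PySem.Dict.mk nodes) (nodes.map Prod.fst))^[nodes.length] []) node = true
instance (part : Int) (nodes : List (String × List String)) (node : String) (count : Int) (string : String) : Decidable (Pre_recurse part nodes node count string) := by unfold Pre_recurse; infer_instance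

def pvWitness_recurse : Int × (List (String × List String)) × String × Int × String :=
  (1, [("r", ["a", "@"]), ("a", ["@", "@"])], "r", 0, "")

def Spec_recurse (part : Int) (nodes : List (String × List String)) (node : String) (count : Int) (string : String) (out : List (Int × String)) : Prop := out = recurse_alt part nodes node count string
instance (part : Int) (nodes : List (String × List String)) (node : String) (count : Int) (string : String) (out : List (Int × String)) : Decidable (Spec_recurse part nodes node count string out) := by unfold Spec_recurse; infer_instance

-- ===== CLAIM (what is proved, stated in full; the proofs are below) =====
def Claim_equal_recurse : Prop := ∀ (part : Int) (nodes : List (String × List String)) (node : String) (count : Int) (string : String), Dom_recurse part nodes node count string → Pre_recurse part nodes node count string → Spec_recurse part nodes node count string (recurse part nodes node count string)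

-- ===== LEMMAS AND PROOFS =====

-- Reference function for the proofs: B's relative computation without the memo.
mutual
def relPureF (part : Int) (nodesD : PySem.Dict String (List String)) :
    Nat → String → Option (PySem.Dict Int (Option String))
  | 0, _ => none
  | f + 1, n =>
    if n == "@" then
      some (PySem.Dict.insert PySem.Dict.empty 0 (some ""))
    else if n == "ANT" || n == "BUG" then
      some PySem.Dict.empty
    else
      match PySem.Dict.get? nodesD n with
      | some children => loopR part nodesD f children PySem.Dict.empty
      | none => some PySem.Dict.empty

def loopR (part : Int) (nodesD : PySem.Dict String (List String)) :
    Nat → List String → PySem.Dict Int (Option String) → Option (PySem.Dict Int (Option String))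
  | _, [], fruits => some fruits
  | f, s :: rest, fruits =>
    match (if part == 1 then some s
           else (PySem.Str.pyGet? s 0).map (fun ch => String.singleton ch)) with
    | none => none
    | some pre =>
      match relPureF part nodesD f s with
      | none => none
      | some r =>
        loopR part nodesD f rest
          (r.items.foldl
            (fun fr kv =>
              if fr.contains (kv.1 + 1) = false then
                fr.insert (kv.1 + 1) (Option.map (fun v => pre ++ v) kv.2)
              else fr.insert (kv.1 + 1) none)
            fruits)
end

def vmap (s : String) (o : Option String) : String :=
  match o with | none => "DUP" | some v => s ++ v

def phiL (c : Int) (s : String) (l : List (Int × Option String)) : List (Int × String) :=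
  l.map (fun kv => (kv.1 + c, vmap s kv.2))

def phiD (c : Int) (s : String) (d : PySem.Dict Int (Option String)) : PySem.Dict Int String :=
  PySem.Dict.mk (phiL c s d.items)

lemma phiD_contains (c : Int) (s : String) (d : PySem.Dict Int (Option String)) (k : Int) :
    (phiD c s d).contains (k + c) = d.contains k := by
  rw [PySem.Dict.contains_eq_decide_mem_keys, PySem.Dict.contains_eq_decide_mem_keys]
  simp only [PySem.Dict.keys, phiD, phiL]
  congr 1
  simp only [eq_iff_iff, List.map_map, List.mem_map]
  constructor
  · rintro ⟨kv, hm, h⟩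
    simp at h
    obtain ⟨h1, -⟩ := h
    exact ⟨kv, hm, by omega⟩
  · rintro ⟨kv, hm, h⟩
    exact ⟨kv, hm, by simp; omega⟩

lemma phiD_insert (c : Int) (s : String) (d : PySem.Dict Int (Option String)) (k : Int) (o : Option String) :
    phiD c s (d.insert k o) = (phiD c s d).insert (k + c) (vmap s o) := by
  apply PySem.Dict.ext
  have hc : (phiD c s d).contains (k + c) = d.contains k := phiD_contains c s d k
  rw [PySem.Dict.items_insert]
  by_cases h : d.contains k = true
  · rw [hc, if_pos h]
    simp only [phiD, phiL, PySem.Dict.items_insert, if_pos h, List.map_map]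
    apply List.map_congr_left
    intro p _
    by_cases hp : p.1 = k
    · simp [hp, vmap]
    · simp [hp]
  · rw [hc, if_neg h]
    simp only [phiD, phiL, PySem.Dict.items_insert]
    rw [if_neg h]
    simp

lemma vmap_pre (s pre : String) (o : Option String) :
    vmap s (Option.map (fun v => pre ++ v) o) = vmap (s ++ pre) o := by
  cases o with
  | none => rfl
  | some v => simp [vmap, String.append_assoc]

-- merge step: A's inner items-loop is the phi-image of B's relative merge loop
lemma merge_phi (c : Int) (s pre : String) (l : List (Int × Option String)) (fr : PySem.Dict Int (Option String)) :
    (phiL (c + 1) (s ++ pre) l).foldl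
        (fun fr kv => if fr.contains kv.1 = false then fr.insert kv.1 kv.2 else fr.insert kv.1 "DUP")
        (phiD c s fr)
      = phiD c s
        (l.foldl
          (fun fr kv =>
            if fr.contains (kv.1 + 1) = false then
              fr.insert (kv.1 + 1) (Option.map (fun v => pre ++ v) kv.2)
            else fr.insert (kv.1 + 1) none)
          fr) := by
  unfold phiL
  rw [List.foldl_map]
  induction l generalizing fr with
  | nil => rfl
  | cons kv rest ih =>
    simp only [List.foldl_cons]
    have hk : kv.1 + (c + 1) = (kv.1 + 1) + c := by ring
    rw [hk, phiD_contains]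
    by_cases h : fr.contains (kv.1 + 1) = false
    · rw [if_pos h, if_pos h]
      rw [← vmap_pre s pre kv.2, ← phiD_insert]
      exact ih _
    · rw [if_neg h, if_neg h]
      have : ("DUP" : String) = vmap s none := rfl
      rw [this, ← phiD_insert]
      exact ih _

-- fuel monotonicity of the reference function
lemma relPure_mono (part : Int) (nodesD : PySem.Dict String (List String)) :
    ∀ f : Nat,
      (∀ n d, relPureF part nodesD f n = some d → relPureF part nodesD (f + 1) n = some d) ∧
      (∀ ch fr out, loopR part nodesD f ch fr = some out → loopR part nodesD (f + 1) ch fr = some out) := by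
  intro f
  induction f with
  | zero =>
    refine ⟨?_, ?_⟩
    · intro n d h; simp [relPureF] at h
    · intro ch fr out h
      cases ch with
      | nil => simpa only [loopR] using h
      | cons s rest =>
        exfalso
        simp only [loopR] at h
        cases hpre : (if part == 1 then some s
            else (PySem.Str.pyGet? s 0).map (fun ch => String.singleton ch)) with
        | none => rw [hpre] at h; simp at h
        | some pre => rw [hpre] at h; simp [relPureF] at h
  | succ f ih =>
    have hrel : ∀ n d, relPureF part nodesD (f + 1) n = some d →
        relPureF part nodesD (f + 1 + 1) n = some d := by
      intro n d h
      simp only [relPureF] at h ⊢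
      split_ifs at h ⊢ with h1 h2
      · exact h
      · exact h
      · cases hg : PySem.Dict.get? nodesD n with
        | none => rw [hg] at h; exact h
        | some children => rw [hg] at h; exact ih.2 children _ _ h
    refine ⟨hrel, ?_⟩
    intro ch
    induction ch with
    | nil => intro fr out h; simpa only [loopR] using h
    | cons s rest ihl =>
      intro fr out h
      simp only [loopR] at h ⊢
      cases hpre : (if part == 1 then some s
          else (PySem.Str.pyGet? s 0).map (fun ch => String.singleton ch)) with
      | none => rw [hpre] at h; simp at h
      | some pre =>
        rw [hpre] at h
        cases hr : relPureF part nodesD (f + 1) s with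
        | none => rw [hr] at h; simp at h
        | some r =>
          rw [hr] at h
          simp only [hrel s r hr]
          exact ihl _ _ h

lemma relPure_le (part : Int) (nodesD : PySem.Dict String (List String)) {f g : Nat} (h : f ≤ g)
    {n : String} {d : PySem.Dict Int (Option String)} (hd : relPureF part nodesD f n = some d) :
    relPureF part nodesD g n = some d := by
  induction g with
  | zero =>
    have : f = 0 := by omega
    subst this; simp [relPureF] at hd
  | succ g ih =>
    rcases Nat.lt_or_ge f (g + 1) with hlt | hge
    · exact (relPure_mono part nodesD g).1 n d (ih (by omega))
    · have : f = g + 1 := by omega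
      subst this; exact hd

lemma relPure_unique (part : Int) (nodesD : PySem.Dict String (List String)) {f g : Nat}
    {n : String} {a b : PySem.Dict Int (Option String)}
    (ha : relPureF part nodesD f n = some a) (hb : relPureF part nodesD g n = some b) : a = b := by
  have h1 := relPure_le part nodesD (Nat.le_max_left f g) ha
  have h2 := relPure_le part nodesD (Nat.le_max_right f g) hb
  rw [h1] at h2; exact Option.some.inj h2

lemma newString_eq (part : Int) (string s : String) :
    (if part == 1 then some (string ++ s)
      else (PySem.Str.pyGet? s 0).map (fun ch => string ++ String.singleton ch))
    = (if part == 1 then some s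
        else (PySem.Str.pyGet? s 0).map (fun ch => String.singleton ch)).map
        (fun p => string ++ p) := by
  split_ifs
  · rfl
  · cases PySem.Str.pyGet? s 0 <;> rfl

lemma phiD_empty (c : Int) (s : String) : phiD c s PySem.Dict.empty = PySem.Dict.empty := rfl

-- A's recursion is the phi-image of the relative reference computation
lemma recurseF_phi (part : Int) (nodesD : PySem.Dict String (List String)) :
    ∀ f : Nat,
      (∀ n c s, recurseF part nodesD f n c s = (relPureF part nodesD f n).map (phiD c s)) ∧
      (∀ ch c s fr, loopA part nodesD f ch c s (phiD c s fr)
          = (loopR part nodesD f ch fr).map (phiD c s)) := by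
  intro f
  induction f with
  | zero =>
    refine ⟨?_, ?_⟩
    · intro n c s; simp [recurseF, relPureF]
    · intro ch c s fr
      cases ch with
      | nil => simp [loopA, loopR]
      | cons lab rest =>
        simp only [loopA, loopR, newString_eq]
        cases hpre : (if part == 1 then some lab
            else (PySem.Str.pyGet? lab 0).map (fun ch => String.singleton ch)) with
        | none => rfl
        | some pre => simp [recurseF, relPureF]
  | succ f ih =>
    have hrel : ∀ n c s, recurseF part nodesD (f + 1) n c s
        = (relPureF part nodesD (f + 1) n).map (phiD c s) := by
      intro n c s
      simp only [recurseF, relPureF]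
      split_ifs with h1 h2
      · simp only [Option.map_some]
        rw [phiD_insert]
        simp [phiD_empty, vmap]
      · rfl
      · cases hg : PySem.Dict.get? nodesD n with
        | none => rfl
        | some children =>
          have h0 := ih.2 children c s PySem.Dict.empty
          rw [phiD_empty] at h0
          exact h0
    refine ⟨hrel, ?_⟩
    intro ch
    induction ch with
    | nil => intro c s fr; simp [loopA, loopR]
    | cons lab rest ihl =>
      intro c s fr
      simp only [loopA, loopR, newString_eq]
      cases hpre : (if part == 1 then some lab
          else (PySem.Str.pyGet? lab 0).map (fun ch => String.singleton ch)) with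
      | none => rfl
      | some pre =>
        simp only [Option.map_some]
        rw [hrel lab (c + 1) (s ++ pre)]
        cases hr : relPureF part nodesD (f + 1) lab with
        | none => rfl
        | some r =>
          simp only [Option.map_some]
          have hm := merge_phi c s pre r.items fr
          simp only [phiD] at hm ⊢
          rw [show (phiL (c + 1) (s ++ pre) r.items) = (PySem.Dict.mk (phiL (c + 1) (s ++ pre) r.items)).items from rfl] at hm
          rw [hm]
          exact ihl c s _

-- memo invariant: every stored entry is a value of the reference function
def MemoInv (part : Int) (nodesD : PySem.Dict String (List String))
    (memo : PySem.Dict String (PySem.Dict Int (Option String))) : Prop :=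
  ∀ p ∈ memo.items, ∃ f, relPureF part nodesD f p.1 = some p.2

lemma MemoInv_insert (part : Int) (nodesD : PySem.Dict String (List String))
    {memo : PySem.Dict String (PySem.Dict Int (Option String))} {n : String}
    {d : PySem.Dict Int (Option String)} {f0 : Nat}
    (hm : MemoInv part nodesD memo) (hd : relPureF part nodesD f0 n = some d) :
    MemoInv part nodesD (memo.insert n d) := by
  intro p hp
  rcases (PySem.Dict.mem_items_insert memo n d p).1 hp with rfl | ⟨hp, -⟩
  · exact ⟨f0, hd⟩
  · exact hm p hp

lemma relF_correct (part : Int) (nodesD : PySem.Dict String (List String)) :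
    ∀ f : Nat,
      (∀ n memo d, MemoInv part nodesD memo → relPureF part nodesD f n = some d →
        ∃ memo', relF part nodesD f memo n = some (memo', d) ∧ MemoInv part nodesD memo') ∧
      (∀ ch memo fr out, MemoInv part nodesD memo → loopR part nodesD f ch fr = some out →
        ∃ memo', loopB part nodesD f memo ch fr = some (memo', out) ∧ MemoInv part nodesD memo') := by
  intro f
  induction f with
  | zero =>
    refine ⟨?_, ?_⟩
    · intro n memo d _ h; simp [relPureF] at h
    · intro ch memo fr out hm h
      cases ch with
      | nil =>
        simp only [loopR] at h
        obtain rfl := Option.some.inj h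
        exact ⟨memo, by simp [loopB], hm⟩
      | cons lab rest =>
        exfalso
        simp only [loopR] at h
        cases hpre : (if part == 1 then some lab
            else (PySem.Str.pyGet? lab 0).map (fun ch => String.singleton ch)) with
        | none => rw [hpre] at h; simp at h
        | some pre => rw [hpre] at h; simp [relPureF] at h
  | succ f ih =>
    have hrel : ∀ n memo d, MemoInv part nodesD memo → relPureF part nodesD (f + 1) n = some d →
        ∃ memo', relF part nodesD (f + 1) memo n = some (memo', d) ∧ MemoInv part nodesD memo' := by
      intro n memo d hm h
      have horig := h
      simp only [relF]
      cases hmem : PySem.Dict.get? memo n with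
      | some r0 =>
        obtain ⟨f0, hf0⟩ := hm (n, r0) (PySem.Dict.mem_items_of_get?_eq_some memo hmem)
        obtain rfl : r0 = d := relPure_unique part nodesD hf0 h
        exact ⟨memo, rfl, hm⟩
      | none =>
        simp only [relPureF] at h
        by_cases h1 : (n == "@") = true
        · rw [if_pos h1] at h
          obtain rfl := Option.some.inj h
          refine ⟨memo.insert n _, ?_, MemoInv_insert part nodesD hm horig⟩
          rw [if_pos h1]
        · rw [if_neg h1] at h
          rw [if_neg h1]
          by_cases h2 : (n == "ANT" || n == "BUG") = true
          · rw [if_pos h2] at h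
            obtain rfl := Option.some.inj h
            refine ⟨memo.insert n _, ?_, MemoInv_insert part nodesD hm horig⟩
            rw [if_pos h2]
          · rw [if_neg h2] at h
            rw [if_neg h2]
            cases hg : PySem.Dict.get? nodesD n with
            | none =>
              rw [hg] at h
              obtain rfl := Option.some.inj h
              exact ⟨memo.insert n _, rfl, MemoInv_insert part nodesD hm horig⟩
            | some children =>
              rw [hg] at h
              obtain ⟨memo1, hB, hm1⟩ := ih.2 children memo PySem.Dict.empty d hm h
              simp only [hB]
              exact ⟨memo1.insert n d, rfl, MemoInv_insert part nodesD hm1 horig⟩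
    refine ⟨hrel, ?_⟩
    intro ch
    induction ch with
    | nil =>
      intro memo fr out hm h
      simp only [loopR] at h
      obtain rfl := Option.some.inj h
      exact ⟨memo, by simp [loopB], hm⟩
    | cons lab rest ihl =>
      intro memo fr out hm h
      simp only [loopR] at h
      simp only [loopB]
      cases hpre : (if part == 1 then some lab
          else (PySem.Str.pyGet? lab 0).map (fun ch => String.singleton ch)) with
      | none => rw [hpre] at h; simp at h
      | some pre =>
        rw [hpre] at h
        cases hr : relPureF part nodesD (f + 1) lab with
        | none => rw [hr] at h; simp at h
        | some r =>
          rw [hr] at h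
          obtain ⟨memo1, hB, hm1⟩ := hrel lab memo r hm hr
          rw [hB]
          exact ihl memo1 _ out hm1 h

lemma pyGet0_isSome (s : String) (h : ¬ s = "") : (PySem.Str.pyGet? s 0).isSome := by
  have hl : 0 < s.length := by
    rcases Nat.eq_zero_or_pos s.length with h0 | h0
    · exact absurd (String.length_eq_zero_iff.mp h0) h
    · exact h0
  simp [PySem.Str.pyGet?, PySem.List.pyGet?, PySem.List.pyIdx?]
  rw [if_pos hl]
  simp
  exact hl

-- any child classified fine by okChildPre (with all of T succeeding) itself succeeds
lemma okChild_success (part : Int) (nodesD : PySem.Dict String (List String))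
    (T : List String) (g : Nat)
    (hT : ∀ m ∈ T, ∃ d, relPureF part nodesD (g + 1) m = some d)
    (s : String) (hok : okChildPre nodesD T s = true) :
    ∃ d, relPureF part nodesD (g + 1) s = some d := by
  by_cases h1 : (s == "@") = true
  · exact ⟨_, by simp only [relPureF]; rw [if_pos h1]⟩
  · by_cases h2 : (s == "ANT" || s == "BUG") = true
    · exact ⟨_, by simp only [relPureF]; rw [if_neg h1, if_pos h2]⟩
    · by_cases h3 : nodesD.contains s = true
      · have hmem : s ∈ T := by
          unfold okChildPre at hok
          simp at hok
          rcases hok with (((ha | hb) | hc) | hd) | he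
          · exact absurd (by simp [ha]) h1
          · exact absurd (by simp [hb]) h2
          · exact absurd (by simp [hc]) h2
          · rw [h3] at hd; simp at hd
          · exact he
        exact hT s hmem
      · have hg : PySem.Dict.get? nodesD s = none := by
          rw [PySem.Dict.contains_eq_isSome_get?] at h3
          exact Option.not_isSome_iff_eq_none.mp (by simpa using h3)
        exact ⟨_, by simp only [relPureF]; rw [if_neg h1, if_neg h2, hg]⟩

lemma loop_success (part : Int) (nodesD : PySem.Dict String (List String)) (g : Nat) :
    ∀ ch : List String,
      (∀ s ∈ ch, (part == 1 || !(s == "")) = true ∧ ∃ d, relPureF part nodesD (g + 1) s = some d) →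
      ∀ fr, ∃ out, loopR part nodesD (g + 1) ch fr = some out := by
  intro ch
  induction ch with
  | nil => intro _ fr; exact ⟨fr, by simp [loopR]⟩
  | cons lab rest ihl =>
    intro h fr
    obtain ⟨hne, dlab, hlab⟩ := h lab (by simp)
    have hpre : ∃ pre, (if part == 1 then some lab
        else (PySem.Str.pyGet? lab 0).map (fun ch => String.singleton ch)) = some pre := by
      by_cases hp : (part == 1) = true
      · exact ⟨lab, by rw [if_pos hp]⟩
      · simp only [hp, Bool.false_or] at hne
        have : ¬ lab = "" := by simpa using hne
        obtain ⟨c, hc⟩ := Option.isSome_iff_exists.mp (pyGet0_isSome lab this)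
        exact ⟨String.singleton c, by rw [if_neg hp, hc]; rfl⟩
    obtain ⟨pre, hpre⟩ := hpre
    simp only [loopR, hpre, hlab]
    exact ihl (fun s hs => h s (by simp [hs])) _

-- Kahn elimination gives termination of the reference function
lemma kahn (part : Int) (nodesD : PySem.Dict String (List String)) (keys : List String) :
    ∀ i : Nat, ∀ n ∈ (stepPre part nodesD keys)^[i] ([] : List String),
      ∃ d, relPureF part nodesD (i + 1) n = some d := by
  intro i
  induction i with
  | zero => intro n hn; simp at hn
  | succ i ih =>
    intro n hn
    rw [Function.iterate_succ_apply'] at hn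
    unfold stepPre at hn
    rw [List.mem_filter] at hn
    obtain ⟨-, hcond⟩ := hn
    cases hg : PySem.Dict.get? nodesD n with
    | none => rw [hg] at hcond; simp at hcond
    | some children =>
      rw [hg] at hcond
      simp only [List.all_eq_true] at hcond
      by_cases h1 : (n == "@") = true
      · exact ⟨_, by simp only [relPureF]; rw [if_pos h1]⟩
      · by_cases h2 : (n == "ANT" || n == "BUG") = true
        · exact ⟨_, by simp only [relPureF]; rw [if_neg h1, if_pos h2]⟩
        · obtain ⟨out, hout⟩ := loop_success part nodesD i children
            (fun s hs => by
              have := hcond s hs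
              simp only [Bool.and_eq_true] at this
              exact ⟨this.1, okChild_success part nodesD _ i ih s this.2⟩) PySem.Dict.empty
          exact ⟨out, by simp only [relPureF]; rw [if_neg h1, if_neg h2, hg]; exact hout⟩

lemma pre_terminates (part : Int) (nodes : List (String × List String)) (node : String)
    (count : Int) (string : String) (h : Pre_recurse part nodes node count string) :
    ∃ d, relPureF part (PySem.Dict.mk nodes) (nodes.length + 1) node = some d := by
  unfold Pre_recurse at h
  exact okChild_success part (PySem.Dict.mk nodes) _ nodes.length
    (kahn part (PySem.Dict.mk nodes) (nodes.map Prod.fst) nodes.length) node h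

-- ===== VERDICT (by name: the statement is the Claim_ definition above) =====
theorem recurse_spec : Claim_equal_recurse := by
  intro part nodes node count string _hdom hpre
  unfold Spec_recurse
  obtain ⟨d, hd⟩ := pre_terminates part nodes node count string hpre
  have hA := (recurseF_phi part (PySem.Dict.mk nodes) (nodes.length + 1)).1 node count string
  rw [hd] at hA
  obtain ⟨memo', hB, _⟩ := (relF_correct part (PySem.Dict.mk nodes) (nodes.length + 1)).1
    node PySem.Dict.empty d (by intro p hp; simp [PySem.Dict.empty] at hp) hd
  unfold recurse recurse_alt
  rw [hA, hB]
  simp [phiD, phiL, vmap]
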